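-- pv_equiv track=rewrite | github.com/crupib/python | misc/XXOOs.py | get_xos_count
-- ===== SOURCE A (Python) =====
-- def get_xos_count(xxoos_list):
--    ocount = 0
--    xcount = 0
--    for item in xxoos_list:
--       if item == "O":
--         ocount += 1
--       if item == "X":
--         xcount += 1
--    return [ocount, xcount]
-- ===== SOURCE B (Python) =====
-- def get_xos_count(xxoos_list):
--     xs = list(xxoos_list)
--     return [xs.count("O"), xs.count("X")]
-- ===== Notes on version B (the rewrite author's own statement) =====
-- stated objective: idiomatic
-- what changed: Replaces the explicit loop with two scalar accumulators by two list.count library calls (one scan per symbol).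
import Mathlib
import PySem

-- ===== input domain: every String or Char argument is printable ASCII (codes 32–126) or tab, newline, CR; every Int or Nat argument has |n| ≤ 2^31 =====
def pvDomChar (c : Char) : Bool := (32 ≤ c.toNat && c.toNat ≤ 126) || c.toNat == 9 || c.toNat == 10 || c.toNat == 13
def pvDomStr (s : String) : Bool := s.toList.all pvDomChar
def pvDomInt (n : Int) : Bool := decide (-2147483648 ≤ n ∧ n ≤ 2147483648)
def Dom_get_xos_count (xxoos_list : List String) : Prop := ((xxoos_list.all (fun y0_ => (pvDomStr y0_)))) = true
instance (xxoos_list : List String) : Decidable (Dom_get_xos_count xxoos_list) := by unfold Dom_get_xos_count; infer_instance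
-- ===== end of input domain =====

-- ===== PORT A =====
-- Header: B counts "O" and "X" with two list.count passes instead of one loop with two accumulators (idiomatic).
def get_xos_count (xxoos_list : List String) : List Int :=
  let st := xxoos_list.foldl (fun (acc : Int × Int) item =>
    let acc := if item == "O" then (acc.1 + 1, acc.2) else acc
    if item == "X" then (acc.1, acc.2 + 1) else acc) (0, 0)
  [st.1, st.2]

-- ===== PORT B =====
def get_xos_count_alt (xxoos_list : List String) : List Int :=
  [(PySem.List.count xxoos_list "O" : Int), (PySem.List.count xxoos_list "X" : Int)]

-- ===== PRECONDITION & SPEC =====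
def Spec_get_xos_count (xxoos_list : List String) (out : List Int) : Prop := out = get_xos_count_alt xxoos_list
instance (xxoos_list : List String) (out : List Int) : Decidable (Spec_get_xos_count xxoos_list out) := by unfold Spec_get_xos_count; infer_instance

-- ===== CLAIM (what is proved, stated in full; the proofs are below) =====
def Claim_equal_get_xos_count : Prop := ∀ (xxoos_list : List String), Dom_get_xos_count xxoos_list → Spec_get_xos_count xxoos_list (get_xos_count xxoos_list)

-- ===== LEMMAS AND PROOFS =====

-- ===== VERDICT (by name: the statement is the Claim_ definition above) =====
theorem pv_loop (xs : List String) (o x : Int) :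
    xs.foldl (fun (acc : Int × Int) item =>
      let acc := if item == "O" then (acc.1 + 1, acc.2) else acc
      if item == "X" then (acc.1, acc.2 + 1) else acc) (o, x)
    = (o + (PySem.List.count xs "O" : Int), x + (PySem.List.count xs "X" : Int)) := by
  induction xs generalizing o x with
  | nil => simp [PySem.List.count]
  | cons h t ih =>
      simp only [List.foldl, PySem.List.count, List.count_cons] at *
      by_cases hO : h = "O" <;> by_cases hX : h = "X" <;>
        simp_all <;> push_cast <;> ring

theorem get_xos_count_spec : Claim_equal_get_xos_count := by
  intro xs _
  unfold Spec_get_xos_count get_xos_count get_xos_count_alt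
  rw [pv_loop]
  simp
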